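-- pv_equiv track=rewrite | github.com/alexasp/mml-2015 | data/sources/preprocess_data_set.py | calculate_rescale_0_1
-- ===== SOURCE A (Python) =====
-- def calculate_rescale_0_1(training_set):
--     scaling = []
--     for feature_index in range(len(training_set[0])):
--         minimum = float("inf")
--         maximum = float("-inf")
--         for sample in training_set:
--             if sample[feature_index] < minimum:
--                 minimum = sample[feature_index]
--             if sample[feature_index] > maximum:
--                 maximum = sample[feature_index]
--         scaling.append({'min': minimum, 'max': maximum})
--     return scaling
-- ===== SOURCE B (Python) =====
-- def calculate_rescale_0_1(training_set):
--     mins = list(training_set[0])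
--     maxs = list(training_set[0])
--     for sample in training_set[1:]:
--         mins = [s if s < m else m for m, s in zip(mins, sample)]
--         maxs = [s if s > m else m for m, s in zip(maxs, sample)]
--     return [{'min': m, 'max': M} for m, M in zip(mins, maxs)]
-- ===== Notes on version B (the rewrite author's own statement) =====
-- stated objective: alternative
-- what changed: A makes one full pass over the data per feature (column-major nested loops with inf sentinels); B streams the samples once, seeding per-feature mins/maxs from the first row and updating all features together via zip, so the data is traversed a single time with no sentinel values.
-- outside the precondition, e.g. on calculate_rescale_0_1([]): A raises IndexError, B raises IndexError; on calculate_rescale_0_1([[1, 2], [3]]): A raises IndexError, B returns [{'min': 1, 'max': 3}]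
import Mathlib
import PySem

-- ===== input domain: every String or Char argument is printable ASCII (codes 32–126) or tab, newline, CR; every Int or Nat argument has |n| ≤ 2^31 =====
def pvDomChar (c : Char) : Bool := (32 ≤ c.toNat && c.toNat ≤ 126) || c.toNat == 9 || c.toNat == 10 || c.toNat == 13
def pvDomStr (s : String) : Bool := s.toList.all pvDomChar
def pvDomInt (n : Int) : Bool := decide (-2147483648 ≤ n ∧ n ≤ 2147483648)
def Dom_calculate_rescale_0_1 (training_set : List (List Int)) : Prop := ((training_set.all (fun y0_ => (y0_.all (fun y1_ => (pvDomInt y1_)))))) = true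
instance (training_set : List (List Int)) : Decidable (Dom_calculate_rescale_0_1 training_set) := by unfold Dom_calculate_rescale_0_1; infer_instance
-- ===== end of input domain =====

-- B replaces A's per-feature passes (with inf/-inf sentinels) by a single pass over the samples,
-- seeding all per-feature mins/maxs from the first row; same results, no sentinels.

-- ===== PORT A =====
-- minimum/maximum carry Python's float('inf')/float('-inf') start as `none`; the first sample
-- always replaces them (v < inf and v > -inf hold for every int), exactly as in A.
def calculate_rescale_0_1 (training_set : List (List Int)) : List (List (String × Int)) :=
  let row0 := (PySem.List.pyGet? training_set 0).getD []   -- training_set[0]; IndexError (empty set) excluded by Pre_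
  (List.range row0.length).foldl (fun (scaling : List (List (String × Int))) (fi : Nat) =>
    let mm := training_set.foldl (fun (p : Option Int × Option Int) sample =>
        let v := PySem.List.pyGetD sample ((fi : Nat) : Int) 0   -- sample[feature_index]; IndexError excluded by Pre_
        ((match p.1 with
          | none => some v
          | some m => if v < m then some v else some m),
         (match p.2 with
          | none => some v
          | some m => if v > m then some v else some m)))
      (none, none)
    scaling ++ [[("min", mm.1.getD 0), ("max", mm.2.getD 0)]]) []

-- ===== PORT B =====
def calculate_rescale_0_1_alt (training_set : List (List Int)) : List (List (String × Int)) :=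
  let first := (PySem.List.pyGet? training_set 0).getD []  -- training_set[0]; IndexError (empty set) excluded by Pre_
  let p := (PySem.List.slice training_set (some 1) none).foldl
      (fun (p : List Int × List Int) sample =>
        ((p.1.zip sample).map (fun ms => if ms.2 < ms.1 then ms.2 else ms.1),
         (p.2.zip sample).map (fun ms => if ms.2 > ms.1 then ms.2 else ms.1)))
      (first, first)
  (p.1.zip p.2).map (fun mM => [("min", mM.1), ("max", mM.2)])

-- ===== PRECONDITION & SPEC =====
-- Pre_ excludes exactly the inputs on which A raises IndexError: the empty training set
-- (training_set[0]) and ragged sets with a sample shorter than the first row (sample[feature_index]).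
def Pre_calculate_rescale_0_1 (training_set : List (List Int)) : Prop :=
  training_set ≠ [] ∧ ∀ r ∈ training_set, (training_set.headD []).length ≤ r.length
instance (training_set : List (List Int)) : Decidable (Pre_calculate_rescale_0_1 training_set) := by
  unfold Pre_calculate_rescale_0_1; infer_instance
def pvWitness_calculate_rescale_0_1 : List (List Int) := [[1, 2], [3, 0]]

def Spec_calculate_rescale_0_1 (training_set : List (List Int)) (out : List (List (String × Int))) : Prop := out = calculate_rescale_0_1_alt training_set
instance (training_set : List (List Int)) (out : List (List (String × Int))) : Decidable (Spec_calculate_rescale_0_1 training_set out) := by unfold Spec_calculate_rescale_0_1; infer_instance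

-- ===== CLAIM (what is proved, stated in full; the proofs are below) =====
def Claim_equal_calculate_rescale_0_1 : Prop := ∀ (training_set : List (List Int)), Dom_calculate_rescale_0_1 training_set → Pre_calculate_rescale_0_1 training_set → Spec_calculate_rescale_0_1 training_set (calculate_rescale_0_1 training_set)

-- ===== LEMMAS AND PROOFS =====

-- reference column folds (both sides reduce to these)
def colMin (i : Nat) (rs : List (List Int)) (a : Int) : Int :=
  rs.foldl (fun a r => if r.getD i 0 < a then r.getD i 0 else a) a
def colMax (i : Nat) (rs : List (List Int)) (a : Int) : Int :=
  rs.foldl (fun a r => if a < r.getD i 0 then r.getD i 0 else a) a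

-- A's inner loop, once both accumulators are some, is the pair of column folds
theorem A_inner (i : Nat) (rs : List (List Int)) : ∀ (a b : Int),
    rs.foldl (fun (p : Option Int × Option Int) sample =>
        let v := PySem.List.pyGetD sample (i : Int) 0
        ((match p.1 with
          | none => some v
          | some m => if v < m then some v else some m),
         (match p.2 with
          | none => some v
          | some m => if v > m then some v else some m)))
      (some a, some b)
    = (some (colMin i rs a), some (colMax i rs b)) := by
  induction rs with
  | nil => intro a b; simp [colMin, colMax]
  | cons r rs ih =>
    intro a b
    simp only [List.foldl_cons, colMin, colMax, PySem.List.pyGetD_natCast]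
    have := ih (if r.getD i 0 < a then r.getD i 0 else a) (if b < r.getD i 0 then r.getD i 0 else b)
    simp [colMin, colMax] at this
    simpa [gt_iff_lt, apply_ite some] using this

-- a pair fold whose step acts componentwise splits into two folds
theorem pair_fold_split {α β γ : Type} (f : α → γ → α) (g : β → γ → β)
    (rs : List γ) : ∀ (a : α) (b : β),
    rs.foldl (fun (p : α × β) s => (f p.1 s, g p.2 s)) (a, b)
    = (rs.foldl f a, rs.foldl g b) := by
  induction rs with
  | nil => intro a b; simp
  | cons r rs ih => intro a b; simpa using ih (f a r) (g b r)

-- B's min fold: length is preserved and entry i is the column-min fold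
theorem B_min_len (rs : List (List Int)) : ∀ (m : List Int), (∀ r ∈ rs, m.length ≤ r.length) →
    (rs.foldl (fun m s => (m.zip s).map (fun ms : Int × Int => if ms.2 < ms.1 then ms.2 else ms.1)) m).length = m.length := by
  induction rs with
  | nil => intro m _; rfl
  | cons r rs ih =>
    intro m h
    have h1 : m.length ≤ r.length := h r (by simp)
    have hlen : ((m.zip r).map (fun ms : Int × Int => if ms.2 < ms.1 then ms.2 else ms.1)).length = m.length := by
      simp [Nat.min_eq_left h1]
    rw [List.foldl_cons, ih _ (by intro x hx; rw [hlen]; exact h x (by simp [hx])), hlen]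

theorem B_max_len (rs : List (List Int)) : ∀ (m : List Int), (∀ r ∈ rs, m.length ≤ r.length) →
    (rs.foldl (fun m s => (m.zip s).map (fun ms : Int × Int => if ms.2 > ms.1 then ms.2 else ms.1)) m).length = m.length := by
  induction rs with
  | nil => intro m _; rfl
  | cons r rs ih =>
    intro m h
    have h1 : m.length ≤ r.length := h r (by simp)
    have hlen : ((m.zip r).map (fun ms : Int × Int => if ms.2 > ms.1 then ms.2 else ms.1)).length = m.length := by
      simp [Nat.min_eq_left h1]
    rw [List.foldl_cons, ih _ (by intro x hx; rw [hlen]; exact h x (by simp [hx])), hlen]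

theorem B_min_get (rs : List (List Int)) : ∀ (m : List Int), (∀ r ∈ rs, m.length ≤ r.length) →
    ∀ i (hi : i < m.length),
    (rs.foldl (fun m s => (m.zip s).map (fun ms : Int × Int => if ms.2 < ms.1 then ms.2 else ms.1)) m).getD i 0
    = colMin i rs (m[i]) := by
  induction rs with
  | nil => intro m _ i hi; simp [colMin, List.getElem?_eq_getElem hi]
  | cons r rs ih =>
    intro m h i hi
    have h1 : m.length ≤ r.length := h r (by simp)
    have hlen : ((m.zip r).map (fun ms : Int × Int => if ms.2 < ms.1 then ms.2 else ms.1)).length = m.length := by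
      simp [Nat.min_eq_left h1]
    rw [List.foldl_cons, ih _ (by intro x hx; rw [hlen]; exact h x (by simp [hx])) i (by omega)]
    have hir : i < r.length := lt_of_lt_of_le hi h1
    have : ((m.zip r).map (fun ms : Int × Int => if ms.2 < ms.1 then ms.2 else ms.1))[i]'(by omega)
        = if r[i] < m[i] then r[i] else m[i] := by
      simp [List.getElem_zip]
    simp only [colMin, List.foldl_cons, this, List.getD_eq_getElem _ _ hir]

theorem B_max_get (rs : List (List Int)) : ∀ (m : List Int), (∀ r ∈ rs, m.length ≤ r.length) →
    ∀ i (hi : i < m.length),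
    (rs.foldl (fun m s => (m.zip s).map (fun ms : Int × Int => if ms.2 > ms.1 then ms.2 else ms.1)) m).getD i 0
    = colMax i rs (m[i]) := by
  induction rs with
  | nil => intro m _ i hi; simp [colMax, List.getElem?_eq_getElem hi]
  | cons r rs ih =>
    intro m h i hi
    have h1 : m.length ≤ r.length := h r (by simp)
    have hlen : ((m.zip r).map (fun ms : Int × Int => if ms.2 > ms.1 then ms.2 else ms.1)).length = m.length := by
      simp [Nat.min_eq_left h1]
    rw [List.foldl_cons, ih _ (by intro x hx; rw [hlen]; exact h x (by simp [hx])) i (by omega)]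
    have hir : i < r.length := lt_of_lt_of_le hi h1
    have : ((m.zip r).map (fun ms : Int × Int => if ms.2 > ms.1 then ms.2 else ms.1))[i]'(by omega)
        = if m[i] < r[i] then r[i] else m[i] := by
      simp [List.getElem_zip, gt_iff_lt]
    simp only [colMax, List.foldl_cons, this, List.getD_eq_getElem _ _ hir]

-- ===== VERDICT (by name: the statement is the Claim_ definition above) =====
theorem calculate_rescale_0_1_spec : Claim_equal_calculate_rescale_0_1 := by
  intro ts _ hpre
  obtain ⟨hne, hlen⟩ := hpre
  obtain ⟨r0, rest, rfl⟩ : ∃ r0 rest, ts = r0 :: rest := by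
    cases ts with
    | nil => exact absurd rfl hne
    | cons a l => exact ⟨a, l, rfl⟩
  have hlen' : ∀ r ∈ rest, r0.length ≤ r.length := by
    intro r hr; simpa using hlen r (by simp [hr])
  unfold Spec_calculate_rescale_0_1 calculate_rescale_0_1 calculate_rescale_0_1_alt
  simp only [PySem.List.pyGet?_zero_cons, Option.getD_some, PySem.List.slice_from_one, List.tail_cons]
  rw [pair_fold_split (fun m s => (m.zip s).map (fun ms : Int × Int => if ms.2 < ms.1 then ms.2 else ms.1)) (fun m s => (m.zip s).map (fun ms : Int × Int => if ms.2 > ms.1 then ms.2 else ms.1)) rest r0 r0]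
  set p1 := rest.foldl (fun m s => (m.zip s).map (fun ms : Int × Int => if ms.2 < ms.1 then ms.2 else ms.1)) r0 with hp1
  set p2 := rest.foldl (fun m s => (m.zip s).map (fun ms : Int × Int => if ms.2 > ms.1 then ms.2 else ms.1)) r0 with hp2
  have hl1 : p1.length = r0.length := B_min_len rest r0 hlen'
  have hl2 : p2.length = r0.length := B_max_len rest r0 hlen'
  rw [PySem.List.foldl_append_singleton_eq_map]
  apply List.ext_getElem
  · simp [hl1, hl2]
  · intro i h1 h2
    have hi : i < r0.length := by simpa using h1
    simp only [List.nil_append, List.getElem_map, List.getElem_range, List.getElem_zip]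
    have hA : (r0 :: rest).foldl (fun (p : Option Int × Option Int) sample =>
        ((match p.1 with
          | none => some (PySem.List.pyGetD sample (i : Int) 0)
          | some m => if PySem.List.pyGetD sample (i : Int) 0 < m then some (PySem.List.pyGetD sample (i : Int) 0) else some m),
         (match p.2 with
          | none => some (PySem.List.pyGetD sample (i : Int) 0)
          | some m => if PySem.List.pyGetD sample (i : Int) 0 > m then some (PySem.List.pyGetD sample (i : Int) 0) else some m)))
      (none, none) = (some (colMin i rest (r0[i])), some (colMax i rest (r0[i]))) := by
      rw [List.foldl_cons]
      simpa [PySem.List.pyGetD_natCast, List.getElem?_eq_getElem hi] using A_inner i rest r0[i] r0[i]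
    rw [hA]
    have e1 : p1[i]'(by omega) = colMin i rest (r0[i]) := by
      rw [← List.getD_eq_getElem _ _ (by omega)]; exact B_min_get rest r0 hlen' i hi
    have e2 : p2[i]'(by omega) = colMax i rest (r0[i]) := by
      rw [← List.getD_eq_getElem _ _ (by omega)]; exact B_max_get rest r0 hlen' i hi
    simp [e1, e2, colMax]
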